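-- pv_equiv track=rewrite | github.com/Codehouse-OU/review-gpt | reviewgpt/repository/github.py | _find_position_in_diff
-- ===== SOURCE A (Python) =====
-- def _find_position_in_diff(code_diff: str, path: str, to_change: str) -> int:
--     """
--     Find the position of the line in the diff
--     :param code_diff:
--     :param path:
--     :param to_change:
--     :return: line number as int
--     """
--     lines = code_diff.split('\n')
--     path_found = False
--     line_number = 0
--     for i, line in enumerate(lines):
--         # find the line that starts with '+++ b/' + path, e.g. is the diff for the file we are looking for
--         if line.startswith('+++ b/' + path):
--             if path_found:
--                 break
--             if path in line:
--                 path_found = True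
--         if path_found:
--             line_number += 1
--             # if the line contains the "to_change" string, then we found the line number
--             if to_change in line:
--                 return line_number - 2 # -2 because the lines are counted from the file name not @@ -1,1 +1,1 @@
--     return 0
-- ===== SOURCE B (Python) =====
-- def _find_position_in_diff(code_diff: str, path: str, to_change: str) -> int:
--     lines = code_diff.split('\n')
--     header = '+++ b/' + path
--     # stage 1: collect ALL header indices for this path in one pass
--     hdrs = [k for k, line in enumerate(lines) if line.startswith(header)]
--     if not hdrs:
--         return 0
--     # stage 2: the segment for this file runs from its first header to the next one (or EOF)
--     start = hdrs[0]
--     stop = hdrs[1] if len(hdrs) > 1 else len(lines)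
--     segment = lines[start:stop]
--     # stage 3: first line of the segment containing to_change; offset -1 (header + @@ line)
--     hit = next((m for m, line in enumerate(segment) if to_change in line), None)
--     return hit - 1 if hit is not None else 0
-- ===== Notes on version B (the rewrite author's own statement) =====
-- stated objective: alternative
-- what changed: B works in three staged passes -- collect all '+++ b/'+path header indices, slice the segment between the first header and the next header (or EOF), and search that segment for the first line containing to_change (offset -1) -- replacing A's single stateful pass with a path_found flag, a running line_number counter and the -2 adjustment.
import Mathlib
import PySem

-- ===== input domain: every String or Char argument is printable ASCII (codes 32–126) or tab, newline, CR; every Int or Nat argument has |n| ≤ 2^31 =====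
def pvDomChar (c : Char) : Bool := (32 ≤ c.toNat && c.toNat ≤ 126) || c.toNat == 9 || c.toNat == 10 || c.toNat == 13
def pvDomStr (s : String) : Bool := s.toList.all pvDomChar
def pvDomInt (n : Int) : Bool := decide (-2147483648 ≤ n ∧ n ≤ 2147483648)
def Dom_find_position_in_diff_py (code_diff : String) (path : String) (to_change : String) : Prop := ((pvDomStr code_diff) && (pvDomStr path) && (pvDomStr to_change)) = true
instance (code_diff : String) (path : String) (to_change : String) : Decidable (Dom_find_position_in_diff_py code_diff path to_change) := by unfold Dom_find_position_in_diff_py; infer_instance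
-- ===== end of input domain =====

-- B replaces A's single stateful pass (flag, counter, -2 adjustment) by three staged passes:
-- collect all header indices, slice the segment up to the next header, search it; objective: alternative.

-- ===== PORT A =====
-- A's loop: state = (path_found, line_number); 'break'/'return' become results.
def pvALoop (header path to_change : List Char) : List (List Char) → Bool → Int → Int
  | [], _, _ => 0
  | l :: rest, pf, ln =>
    if PySem.Chars.startswith l header then
      if pf then 0   -- break → falls to final 'return 0'
      else
        let pf' := if PySem.Chars.isIn path l then true else pf
        if pf' then
          (if PySem.Chars.isIn to_change l then (ln + 1) - 2 else pvALoop header path to_change rest pf' (ln + 1))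
        else pvALoop header path to_change rest pf' ln
    else
      if pf then
        (if PySem.Chars.isIn to_change l then (ln + 1) - 2 else pvALoop header path to_change rest pf (ln + 1))
      else pvALoop header path to_change rest pf ln

def find_position_in_diff_py (code_diff : String) (path : String) (to_change : String) : Int :=
  pvALoop ("+++ b/".toList ++ path.toList) path.toList to_change.toList
    (PySem.Chars.splitOn code_diff.toList "\n".toList) false 0

-- ===== PORT B =====
-- stage 1: the enumerate-comprehension '[k for k, line in enumerate(lines) if line.startswith(header)]'
-- as structural recursion (indices of the tail are shifted by +1)
def pvIdxs (header : List Char) : List (List Char) → List Nat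
  | [] => []
  | l :: rest =>
    if PySem.Chars.startswith l header then 0 :: (pvIdxs header rest).map (· + 1)
    else (pvIdxs header rest).map (· + 1)

-- stage 3: 'next((m for m, line in enumerate(segment) if to_change in line), None)'
def pvFirstHit (to_change : List Char) : List (List Char) → Option Nat
  | [] => none
  | l :: rest =>
    if PySem.Chars.isIn to_change l then some 0
    else (pvFirstHit to_change rest).map (· + 1)

def find_position_in_diff_py_alt (code_diff : String) (path : String) (to_change : String) : Int :=
  let lines := PySem.Chars.splitOn code_diff.toList "\n".toList
  match pvIdxs ("+++ b/".toList ++ path.toList) lines with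
  | [] => 0
  | start :: restH =>
    -- stage 2: python slice lines[start:stop] with 0 ≤ start ≤ stop ≤ len is exactly drop/take here
    let stop := match restH with | [] => lines.length | j :: _ => j
    match pvFirstHit to_change.toList ((lines.drop start).take (stop - start)) with
    | none => 0
    | some m => (m : Int) - 1

-- ===== PRECONDITION & SPEC =====
def Spec_find_position_in_diff_py (code_diff : String) (path : String) (to_change : String) (out : Int) : Prop := out = find_position_in_diff_py_alt code_diff path to_change
instance (code_diff : String) (path : String) (to_change : String) (out : Int) : Decidable (Spec_find_position_in_diff_py code_diff path to_change out) := by unfold Spec_find_position_in_diff_py; infer_instance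

-- ===== CLAIM (what is proved, stated in full; the proofs are below) =====
def Claim_equal_find_position_in_diff_py : Prop := ∀ (code_diff : String) (path : String) (to_change : String), Dom_find_position_in_diff_py code_diff path to_change → Spec_find_position_in_diff_py code_diff path to_change (find_position_in_diff_py code_diff path to_change)

-- ===== LEMMAS AND PROOFS =====

-- intermediate spec: anchored scan (proof-only)
def pvBScan (header to_change : List Char) : List (List Char) → Int → Int
  | [], _ => 0
  | l :: rest, d =>
    if 0 < d ∧ PySem.Chars.startswith l header then 0
    else if PySem.Chars.isIn to_change l then d - 1
    else pvBScan header to_change rest (d + 1)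

def pvBFind (header to_change : List Char) : List (List Char) → Int
  | [] => 0
  | l :: rest =>
    if PySem.Chars.startswith l header then pvBScan header to_change (l :: rest) 0
    else pvBFind header to_change rest

-- index of the first header line (or length if none)
def pvStop (header : List Char) (lines : List (List Char)) : Nat :=
  match pvIdxs header lines with | [] => lines.length | j :: _ => j

-- the value B computes, as a function of the raw line list
def pvAltCore (header to_change : List Char) (lines : List (List Char)) : Int :=
  match pvIdxs header lines with
  | [] => 0
  | start :: restH =>
    let stop := match restH with | [] => lines.length | j :: _ => j
    match pvFirstHit to_change ((lines.drop start).take (stop - start)) with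
    | none => 0
    | some m => (m : Int) - 1

-- a line starting with pre ++ path contains path as a substring
theorem pv_isIn_of_startswith (pre path l : List Char)
    (h : PySem.Chars.startswith l (pre ++ path) = true) : PySem.Chars.isIn path l = true := by
  rw [PySem.Chars.startswith_iff] at h
  rw [PySem.Chars.isIn_iff_infix]
  obtain ⟨u, hu⟩ := h
  exact ⟨pre, u, by simpa using hu⟩

-- after the anchor A's loop is the anchored scan (A's counter ln = B's offset d, both ≥ 1)
theorem pv_post (header path to_change : List Char) (lines : List (List Char)) :
    ∀ d : Int, 1 ≤ d → pvALoop header path to_change lines true d = pvBScan header to_change lines d := by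
  induction lines with
  | nil => intro d _; rfl
  | cons l rest ih =>
    intro d hd
    simp only [pvALoop, pvBScan]
    by_cases hs : PySem.Chars.startswith l header = true
    · simp [hs, show 0 < d by omega]
    · by_cases ht : PySem.Chars.isIn to_change l = true
      · simp [hs, ht]; omega
      · simp [hs, ht, ih (d + 1) (by omega)]

-- before the anchor: A's loop is the anchored search
theorem pv_pre (pre path to_change : List Char) (lines : List (List Char)) :
    pvALoop (pre ++ path) path to_change lines false 0 = pvBFind (pre ++ path) to_change lines := by
  induction lines with
  | nil => rfl
  | cons l rest ih =>
    simp only [pvALoop, pvBFind]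
    by_cases hs : PySem.Chars.startswith l (pre ++ path) = true
    · have hp := pv_isIn_of_startswith pre path l hs
      simp only [hs, if_true, hp, pvBScan]
      by_cases ht : PySem.Chars.isIn to_change l = true
      · simp [ht]
      · simp [ht, pv_post (pre ++ path) path to_change rest 1 le_rfl]
    · simp [hs, ih]

-- the anchored scan with offset d ≥ 1 is the first-hit search of the segment up to the next header
theorem pv_scan_seg (header to_change : List Char) (lines : List (List Char)) :
    ∀ d : Int, 1 ≤ d →
      pvBScan header to_change lines d =
        (match pvFirstHit to_change (lines.take (pvStop header lines)) with
         | none => 0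
         | some m => d + m - 1) := by
  induction lines with
  | nil => intro d _; rfl
  | cons l rest ih =>
    intro d hd
    by_cases hs : PySem.Chars.startswith l header = true
    · simp [pvBScan, pvStop, pvIdxs, hs, show 0 < d by omega, pvFirstHit]
    · have hstop : pvStop header (l :: rest) = pvStop header rest + 1 := by
        simp only [pvStop, pvIdxs, hs]
        cases h : pvIdxs header rest <;> simp [List.length_cons]
      by_cases ht : PySem.Chars.isIn to_change l = true
      · simp [pvBScan, hs, ht, hstop, pvFirstHit]
      · rw [pvBScan]
        simp only [hs, ht]
        rw [ih (d + 1) (by omega), hstop]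
        simp only [List.take_succ_cons, pvFirstHit, ht]
        cases h : pvFirstHit to_change (rest.take (pvStop header rest)) with
        | none => simp
        | some m => simp; ring

-- the anchored search equals B's staged computation
theorem pv_find_core (header to_change : List Char) (lines : List (List Char)) :
    pvBFind header to_change lines = pvAltCore header to_change lines := by
  induction lines with
  | nil => rfl
  | cons l rest ih =>
    by_cases hs : PySem.Chars.startswith l header = true
    · have hstop : (match pvIdxs header rest with | [] => rest.length | j :: _ => j) = pvStop header rest := rfl
      simp only [pvBFind, hs, if_true, pvAltCore, pvIdxs]
      rw [pvBScan]
      simp only [lt_irrefl, false_and, if_false]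
      by_cases ht : PySem.Chars.isIn to_change l = true
      · -- hit on the anchor line itself: both sides are -1
        cases h : pvIdxs header rest with
        | nil => simp [ht, pvFirstHit, List.length_cons]
        | cons j t => simp [ht, pvFirstHit]
      · simp only [ht]
        rw [pv_scan_seg header to_change rest (0 + 1) (by omega)]
        cases h : pvIdxs header rest with
        | nil =>
          simp only [h, List.drop_zero, List.length_cons, Nat.sub_zero, List.map_nil,
            List.take_succ_cons, pvFirstHit, ht, pvStop]
          cases hh : pvFirstHit to_change (rest.take rest.length) with
          | none => simp
          | some m => simp
        | cons j t =>
          simp only [h, List.map_cons, List.drop_zero, Nat.sub_zero,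
            List.take_succ_cons, pvFirstHit, ht, pvStop]
          cases hh : pvFirstHit to_change (rest.take j) with
          | none => simp
          | some m => simp
    · have : pvAltCore header to_change (l :: rest) = pvAltCore header to_change rest := by
        simp only [pvAltCore, pvIdxs, hs, if_false, Bool.false_eq_true]
        cases h : pvIdxs header rest with
        | nil => simp
        | cons i t =>
          simp only [List.map_cons]
          have hdrop : (l :: rest).drop (i + 1) = rest.drop i := by simp
          have hstop2 : (match t.map (· + 1) with | [] => (l :: rest).length | j :: _ => j)
              = (match t with | [] => rest.length | j :: _ => j) + 1 := by
            cases t <;> simp [List.length_cons]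
          rw [hdrop, hstop2]
          generalize (match t with | [] => rest.length | j :: _ => j) = s
          have hsub : s + 1 - (i + 1) = s - i := by omega
          rw [hsub]
      rw [pvBFind, if_neg hs, ih, this]

-- ===== VERDICT (by name: the statement is the Claim_ definition above) =====
theorem find_position_in_diff_py_spec : Claim_equal_find_position_in_diff_py := by
  intro code_diff path to_change _
  unfold Spec_find_position_in_diff_py find_position_in_diff_py find_position_in_diff_py_alt
  rw [pv_pre "+++ b/".toList path.toList to_change.toList, pv_find_core]
  rfl
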